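-- pv_equiv track=rewrite | github.com/Toygarmetu/Socket-Programming | udpserver.py | interleavePacket
-- ===== SOURCE A (Python) =====
-- def interleavePacket(packets): # Function to mix file packets ensuring everyfile is transmitted almost at the same time
--     interleavedPackets = [] # Create empty list for interleaved packets
--     count = 0 # Created counter for packets
--     maxLen = max([len(packet) for packet in packets]) # find maximum length of packets for
--     for i in range(maxLen):
--         for packet in packets: # For each packet in packets
--             if i < len(packet): # If packet is not empty
--                 interleavedPackets.append(packet[i]) # Append packet to interleaved packets
--                 count += 1 # Increment counter after packet is appended to interleaved packets
--     return interleavedPackets # return interleaved packets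
-- ===== SOURCE B (Python) =====
-- def interleavePacket(packets):
--     # Schedule-by-key: tag every element with its (column, packet) coordinates,
--     # sort all tags lexicographically, and read the values off in that order.
--     # Column-major order with packet order inside a column is exactly the
--     # lexicographic order on (column, packet), so this equals the round-robin.
--     items = [(i, j, x) for j, p in enumerate(packets) for i, x in enumerate(p)]
--     items.sort(key=lambda t: (t[0], t[1]))
--     return [x for _, _, x in items]
-- ===== Notes on version B (the rewrite author's own statement) =====
-- stated objective: alternative
-- what changed: A runs a nested column-by-column round-robin loop over all packets; B never loops over columns at all: it tags each element with its (column, packet) coordinates in one row-major pass, sorts the tags lexicographically, and reads off the values.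
-- outside the precondition, e.g. on interleavePacket([]): A raises ValueError, B returns []
import Mathlib
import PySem

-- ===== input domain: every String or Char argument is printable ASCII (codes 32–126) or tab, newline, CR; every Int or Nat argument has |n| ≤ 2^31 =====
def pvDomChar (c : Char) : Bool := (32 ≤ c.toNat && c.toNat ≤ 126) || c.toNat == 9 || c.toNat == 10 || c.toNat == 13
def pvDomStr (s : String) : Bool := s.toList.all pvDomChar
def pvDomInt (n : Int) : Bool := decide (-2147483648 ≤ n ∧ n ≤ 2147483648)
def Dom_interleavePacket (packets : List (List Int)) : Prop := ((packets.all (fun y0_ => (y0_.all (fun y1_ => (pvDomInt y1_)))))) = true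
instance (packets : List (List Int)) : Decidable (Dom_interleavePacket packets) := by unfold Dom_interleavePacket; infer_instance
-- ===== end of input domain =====

-- B replaces A's column-by-column round-robin loops by tagging each element with its
-- (column, packet) coordinates and sorting the tags lexicographically (objective: alternative).

-- ===== PORT A =====
-- Literal port of A's nested loops.  The Python 'count' variable is dead (never read
-- into the return value) and is omitted.  'max(...)' is PySem.List.max?; none is the
-- ValueError on packets = [], excluded by Pre_.  'packet[i]' has 0 ≤ i < len(packet)
-- guaranteed by the branch, so pyGetD is exact there.
def interleavePacket (packets : List (List Int)) : List Int :=
  match PySem.List.max? (packets.map (fun packet => PySem.List.len packet)) (fun x => x) with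
  | none => []
  | some maxLen =>
    (PySem.List.pyRange 0 maxLen 1).foldl (fun acc i =>
      packets.foldl (fun acc packet =>
        if i < PySem.List.len packet then acc ++ [PySem.List.pyGetD packet i 0] else acc) acc) []

-- ===== PORT B =====
-- Literal port of Source B: the comprehension is flatMap-of-map over the two enumerates,
-- 'sort(key=lambda t: (t[0], t[1]))' is PySem.List.sorted2, the final comprehension a map.
def interleavePacket_alt (packets : List (List Int)) : List Int :=
  (PySem.List.sorted2
      ((PySem.List.enumerate packets 0).flatMap (fun jp =>
        (PySem.List.enumerate jp.2 0).map (fun ix => (ix.1, jp.1, ix.2))))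
      (fun t => t.1) (fun t => t.2.1) false).map (fun t => t.2.2)

-- ===== PRECONDITION & SPEC =====
-- Pre_ excludes only packets = [], on which Python's max([]) raises ValueError.
def Pre_interleavePacket (packets : List (List Int)) : Prop := packets ≠ []
instance (packets : List (List Int)) : Decidable (Pre_interleavePacket packets) := by
  unfold Pre_interleavePacket; infer_instance

def pvWitness_interleavePacket : List (List Int) := [[1, 2, 3], [4], [5, 6]]

def Spec_interleavePacket (packets : List (List Int)) (out : List Int) : Prop :=
  out = interleavePacket_alt packets
instance (packets : List (List Int)) (out : List Int) :
    Decidable (Spec_interleavePacket packets out) := by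
  unfold Spec_interleavePacket; infer_instance

-- ===== CLAIM (what is proved, stated in full; the proofs are below) =====
def Claim_equal_interleavePacket : Prop :=
  ∀ (packets : List (List Int)), Dom_interleavePacket packets →
    Pre_interleavePacket packets → Spec_interleavePacket packets (interleavePacket packets)

-- ===== LEMMAS AND PROOFS =====

-- Row k: the elements A appends during round k, in packet order.
def row (packets : List (List Int)) (k : Nat) : List Int :=
  packets.filterMap (fun p => p[k]?)

-- ---- A's side: A = concatenation of the rows 0 .. maxLen-1 ----

-- A's inner loop over packets: 'if i < len(packet): out.append(packet[i])' appends row i.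
theorem inner_eq_row (packets : List (List Int)) (i : Int) (hi : 0 ≤ i)
    (acc : List Int) :
    packets.foldl (fun acc packet =>
        if i < PySem.List.len packet then acc ++ [PySem.List.pyGetD packet i 0] else acc) acc
      = acc ++ row packets i.toNat := by
  induction packets generalizing acc with
  | nil => simp [row]
  | cons p t ih =>
    by_cases h : i < PySem.List.len p
    · have h2 : i < (p.length : Int) := by simpa [PySem.List.len_eq] using h
      have hlen : i.toNat < p.length := by omega
      rw [List.foldl_cons, if_pos h, ih,
        PySem.List.pyGetD_eq_getElem p 0 hi (by simpa using h2)]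
      simp [row, List.getElem?_eq_getElem hlen]
    · have hlen : p.length ≤ i.toNat := by simp [PySem.List.len_eq] at h; omega
      rw [List.foldl_cons, if_neg h, ih]
      simp [row, List.getElem?_eq_none hlen]

theorem A_eq_flat (packets : List (List Int)) (maxLen : Int)
    (hmax : PySem.List.max? (packets.map (fun packet => PySem.List.len packet)) (fun x => x)
      = some maxLen) :
    interleavePacket packets = (List.range maxLen.toNat).flatMap (row packets) := by
  unfold interleavePacket
  simp only [hmax]
  rw [PySem.List.pyRange_one, List.foldl_map]
  have hstep : (fun (acc : List Int) (k : Nat) =>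
      packets.foldl (fun acc packet =>
        if (0 : Int) + k < PySem.List.len packet then
          acc ++ [PySem.List.pyGetD packet ((0 : Int) + k) 0] else acc) acc)
      = fun acc k => acc ++ row packets k := by
    funext acc k
    rw [inner_eq_row packets ((0 : Int) + k) (by omega) acc]
    norm_num
  rw [hstep, PySem.List.foldl_append_eq_flatMap]
  norm_num

-- ---- B's side: the lexicographic sort of the tagged elements = the same concatenation ----

-- sorted2 with Int keys IS sorted with the lexicographic key (the two 'before' tests agree).
theorem sorted2_eq_sorted_lex {α : Type} (xs : List α) (k1 k2 : α → Int) :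
    PySem.List.sorted2 xs k1 k2 false
      = PySem.List.sorted xs (fun a => toLex (k1 a, k2 a)) false := by
  unfold PySem.List.sorted2 PySem.List.sorted
  simp only [Bool.false_eq_true, if_false]
  have hbef : (fun a b => decide (k1 a < k1 b) || (!decide (k1 b < k1 a) && decide (k2 a < k2 b)))
      = (fun a b => decide ((fun a => toLex (k1 a, k2 a)) a < (fun a => toLex (k1 a, k2 a)) b)) := by
    funext a b
    rw [Bool.eq_iff_iff]
    simp only [Bool.or_eq_true, Bool.and_eq_true, Bool.not_eq_true',
      decide_eq_true_eq, decide_eq_false_iff_not, Prod.Lex.lt_iff, ofLex_toLex]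
    constructor
    · rintro (h | ⟨h1, h2⟩)
      · exact Or.inl h
      · rcases lt_trichotomy (k1 a) (k1 b) with h | h | h
        · exact Or.inl h
        · exact Or.inr ⟨h, h2⟩
        · exact absurd h h1
    · rintro (h | ⟨h1, h2⟩)
      · exact Or.inl h
      · exact Or.inr ⟨by omega, h2⟩
  rw [hbef]

-- The tags of row k (with values), packet indices starting at j.
def rowT (k : Nat) (packets : List (List Int)) (j : Int) : List (Int × Int × Int) :=
  (PySem.List.enumerate packets j).filterMap (fun jp =>
    jp.2[k]?.map (fun x => ((k : Int), jp.1, x)))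

-- The tagged-element list Source B builds, packet indices starting at j.
def itemsJ (packets : List (List Int)) (j : Int) : List (Int × Int × Int) :=
  (PySem.List.enumerate packets j).flatMap (fun jp =>
    (PySem.List.enumerate jp.2 0).map (fun ix => (ix.1, jp.1, ix.2)))

theorem rowT_cons (k : Nat) (p : List Int) (t : List (List Int)) (j : Int) :
    rowT k (p :: t) j
      = (p[k]?.map (fun x => ((k : Int), j, x))).toList ++ rowT k t (j + 1) := by
  cases h : p[k]? <;> simp [rowT, PySem.List.enumerate_cons, h]

theorem mem_rowT (k : Nat) (t : List (List Int)) (j : Int) (y : Int × Int × Int)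
    (hy : y ∈ rowT k t j) : y.1 = (k : Int) ∧ j ≤ y.2.1 := by
  induction t generalizing j with
  | nil => simp [rowT] at hy
  | cons p t ih =>
    rw [rowT_cons] at hy
    rcases List.mem_append.mp hy with h | h
    · cases hk : p[k]? <;> simp only [hk, Option.map_none, Option.map_some, Option.toList_some, Option.toList_none, List.not_mem_nil, List.mem_singleton] at h
      rcases h with ⟨rfl, rfl⟩
      simp
    · have := ih (j + 1) h
      exact ⟨this.1, by omega⟩

-- One packet's tags, read off column-by-column over any m ≥ its length.
theorem flat_opt_eq_enum (p : List Int) (j : Int) (m : Nat) (hm : p.length ≤ m) :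
    (List.range m).flatMap (fun (k : Nat) => (p[k]?.map (fun x => ((k : Int), j, x))).toList)
      = (PySem.List.enumerate p 0).map (fun ix => (ix.1, j, ix.2)) := by
  have hsplit : m = p.length + (m - p.length) := by omega
  rw [hsplit, List.range_add, List.flatMap_append]
  have h2 : ((List.range (m - p.length)).map (p.length + ·)).flatMap
      (fun (k : Nat) => (p[k]?.map (fun x => ((k : Int), j, x))).toList) = [] := by
    rw [List.flatMap_map, List.flatMap_eq_nil_iff]
    intro i _
    simp
  rw [h2, List.append_nil]
  have h3 : ∀ k ∈ List.range p.length,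
      (p[k]?.map (fun x => ((k : Int), j, x))).toList
        = [((k : Int), j, p.getD k 0)] := by
    intro k hk
    have hkl := List.mem_range.mp hk
    simp [List.getD_eq_getElem?_getD, List.getElem?_eq_getElem hkl]
  rw [List.flatMap_congr h3, ← List.map_eq_flatMap]
  apply List.ext_getElem
  · simp [PySem.List.length_enumerate]
  · intro i h1 h2
    have hi : i < p.length := by simpa using h1
    have he : i < (PySem.List.enumerate p 0).length := by
      simpa [PySem.List.length_enumerate] using hi
    simp [PySem.List.getElem_enumerate p 0 i he, List.getD_eq_getElem?_getD,
      List.getElem?_eq_getElem hi]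

theorem itemsJ_perm (m : Nat) (packets : List (List Int))
    (hm : ∀ p ∈ packets, p.length ≤ m) (j : Int) :
    (itemsJ packets j).Perm ((List.range m).flatMap (fun k => rowT k packets j)) := by
  induction packets generalizing j with
  | nil => simp [itemsJ, rowT, PySem.List.enumerate_nil]
  | cons p t ih =>
    have hp : p.length ≤ m := hm p (by simp)
    have ht : ∀ q ∈ t, q.length ≤ m := fun q hq => hm q (List.mem_cons_of_mem _ hq)
    have hL : itemsJ (p :: t) j
        = (PySem.List.enumerate p 0).map (fun ix => (ix.1, j, ix.2)) ++ itemsJ t (j + 1) := by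
      simp [itemsJ, PySem.List.enumerate_cons]
    have hR : (List.range m).flatMap (fun k => rowT k (p :: t) j)
        = (List.range m).flatMap (fun (k : Nat) =>
            (p[k]?.map (fun x => ((k : Int), j, x))).toList ++ rowT k t (j + 1)) := by
      exact List.flatMap_congr (fun k _ => rowT_cons k p t j)
    rw [hL, hR]
    refine List.Perm.trans ?_ (List.flatMap_append_perm (List.range m)
      (fun (k : Nat) => (p[k]?.map (fun x => ((k : Int), j, x))).toList)
      (fun (k : Nat) => rowT k t (j + 1)))
    rw [flat_opt_eq_enum p j m hp]
    exact List.Perm.append_left _ (ih ht (j + 1))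

-- Each row's tags are pairwise lex-increasing (constant column, increasing packet index).
theorem rowT_pairwise (k : Nat) (t : List (List Int)) (j : Int) :
    (rowT k t j).Pairwise (fun a b =>
      (toLex (a.1, a.2.1) : Lex (Int × Int)) < toLex (b.1, b.2.1)) := by
  induction t generalizing j with
  | nil => simp [rowT]
  | cons p t ih =>
    rw [rowT_cons]
    apply List.pairwise_append.mpr
    refine ⟨?_, ih (j + 1), ?_⟩
    · cases h : p[k]? <;> simp
    · intro a ha b hb
      have hbm := mem_rowT k t (j + 1) b hb
      cases h : p[k]? <;> simp [h] at ha
      rcases ha with ⟨rfl, rfl⟩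
      rw [Prod.Lex.lt_iff]
      simp only [ofLex_toLex]
      exact Or.inr ⟨hbm.1.symm, by have := hbm.2; omega⟩

theorem ys_pairwise (m : Nat) (packets : List (List Int)) (j : Int) :
    ((List.range m).flatMap (fun k => rowT k packets j)).Pairwise (fun a b =>
      (toLex (a.1, a.2.1) : Lex (Int × Int)) < toLex (b.1, b.2.1)) := by
  apply List.pairwise_flatMap.mpr
  refine ⟨fun k _ => rowT_pairwise k packets j, ?_⟩
  apply List.Pairwise.imp ?_ (List.pairwise_lt_range (n := m))
  intro k1 k2 hk x hx y hy
  have h1 := mem_rowT k1 packets j x hx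
  have h2 := mem_rowT k2 packets j y hy
  rw [Prod.Lex.lt_iff]
  simp only [ofLex_toLex]
  exact Or.inl (by rw [h1.1, h2.1]; exact_mod_cast hk)

theorem map_rowT (k : Nat) (t : List (List Int)) (j : Int) :
    (rowT k t j).map (fun t => t.2.2) = row t k := by
  induction t generalizing j with
  | nil => simp [rowT, row]
  | cons p t ih =>
    rw [rowT_cons, List.map_append, ih]
    cases h : p[k]? <;> simp [row, h]

theorem B_eq_flat (m : Nat) (packets : List (List Int))
    (hm : ∀ p ∈ packets, p.length ≤ m) :
    interleavePacket_alt packets = (List.range m).flatMap (row packets) := by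
  unfold interleavePacket_alt
  rw [sorted2_eq_sorted_lex]
  have hsorted : PySem.List.sorted (itemsJ packets 0)
      (fun t => (toLex (t.1, t.2.1) : Lex (Int × Int))) false
      = (List.range m).flatMap (fun k => rowT k packets 0) :=
    PySem.List.sorted_eq_of_perm_of_pairwise_lt _ _ _
      (itemsJ_perm m packets hm 0).symm (ys_pairwise m packets 0)
  show (PySem.List.sorted (itemsJ packets 0)
      (fun t => (toLex (t.1, t.2.1) : Lex (Int × Int))) false).map (fun t => t.2.2)
    = (List.range m).flatMap (row packets)
  rw [hsorted, List.map_flatMap]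
  exact List.flatMap_congr (fun k _ => map_rowT k packets 0)

-- ===== VERDICT (by name: the statement is the Claim_ definition above) =====
theorem interleavePacket_spec : Claim_equal_interleavePacket := by
  intro packets _ hpre
  unfold Spec_interleavePacket
  rcases hcase : PySem.List.max? (packets.map (fun packet => PySem.List.len packet))
      (fun x => x) with _ | maxLen
  · exact absurd (by simpa [List.map_eq_nil_iff] using
      (PySem.List.max?_eq_none_iff _ _).mp hcase) hpre
  · have hub := PySem.List.max?_isMax hcase
    have hm : ∀ p ∈ packets, p.length ≤ maxLen.toNat := by
      intro p hp
      have := hub (PySem.List.len p) (List.mem_map_of_mem hp)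
      simp [PySem.List.len_eq] at this
      omega
    rw [A_eq_flat packets maxLen hcase, B_eq_flat maxLen.toNat packets hm]
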